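-- pv_equiv track=rewrite | github.com/ThripleT/AdventOfCode2025 | tenFirst.py | read_instruction
-- ===== SOURCE A (Python) =====
-- def read_instruction(instruction):
--     indicators = None
--     buttons = []
--     joltages = None
--     for i in instruction.split():
--         if i.startswith('['):
--             indicators = tuple(i.strip('[]'))
--             continue
--         if i.startswith('('):
--             buttons.append(tuple(map(int, i.strip('()').split(','))))
--             continue
--         if i.startswith('{'):
--             joltages = tuple(map(int, i.strip('{}').split(',')))
--             continue
--     return indicators, buttons, joltages
-- ===== SOURCE B (Python) =====
-- def read_instruction(instruction):
--     # Divide and conquer: summarize each half of the token list independently and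
--     # combine with an associative merge (right half wins for indicators/joltages,
--     # buttons concatenate), instead of a single stateful overwriting loop.
--     toks = instruction.split()
--
--     def leaf(t):
--         if t.startswith('['):
--             return (tuple(t.strip('[]')), [], None)
--         if t.startswith('('):
--             return (None, [tuple(map(int, t.strip('()').split(',')))], None)
--         if t.startswith('{'):
--             return (None, [], tuple(map(int, t.strip('{}').split(','))))
--         return (None, [], None)
--
--     def merge(x, y):
--         return (y[0] if y[0] is not None else x[0],
--                 x[1] + y[1],
--                 y[2] if y[2] is not None else x[2])
--
--     def summ(lo, hi):
--         if hi - lo == 0: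
--             return (None, [], None)
--         if hi - lo == 1:
--             return leaf(toks[lo])
--         mid = (lo + hi) // 2
--         return merge(summ(lo, mid), summ(mid, hi))
--
--     return summ(0, len(toks))
-- ===== Notes on version B (the rewrite author's own statement) =====
-- stated objective: alternative
-- what changed: Replaced A's single stateful overwriting loop by a divide-and-conquer: each half of the token list is summarized recursively and the two summaries are combined with an associative merge (right summary wins for indicators/joltages, button lists concatenate).
-- outside the precondition, e.g. on read_instruction('('): A raises ValueError, B raises ValueError; on read_instruction('{}'): A raises ValueError, B raises ValueError; on read_instruction('{'): A raises ValueError, B raises ValueError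
import Mathlib
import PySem

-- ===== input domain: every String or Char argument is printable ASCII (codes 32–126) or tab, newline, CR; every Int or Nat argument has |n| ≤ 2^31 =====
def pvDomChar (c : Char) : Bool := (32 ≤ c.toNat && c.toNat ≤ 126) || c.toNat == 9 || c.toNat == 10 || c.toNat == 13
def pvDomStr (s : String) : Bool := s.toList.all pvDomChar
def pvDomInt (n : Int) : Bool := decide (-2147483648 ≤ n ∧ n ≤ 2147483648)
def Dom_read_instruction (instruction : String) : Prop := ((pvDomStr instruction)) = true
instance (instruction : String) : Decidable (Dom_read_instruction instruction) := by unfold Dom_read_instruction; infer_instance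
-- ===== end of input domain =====

-- B replaces A's single stateful overwriting loop by a divide-and-conquer over the token
-- list with an associative merge (right half wins for indicators/joltages, buttons
-- concatenate); same return value, objective: alternative decomposition.

-- shared token helpers (both Pythons contain these same subexpressions)
def pvIsInd (t : String) : Bool := PySem.Str.startswith t "["
def pvIsBtn (t : String) : Bool := PySem.Str.startswith t "("
def pvIsJol (t : String) : Bool := PySem.Str.startswith t "{"
-- tuple(map(int, s.split(','))); int(p) is PySem.Int.ofChars?, none exactly where Python
-- raises ValueError — Pre_ excludes those inputs, so the `.getD 0` default is never reached
def pvInts (s : String) : List Int := (PySem.Chars.splitOn s.toList ",".toList).map (fun cs => (PySem.Int.ofChars? cs).getD 0)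
-- tuple(s) — the characters of s as length-1 strings
def pvChars (s : String) : List String := s.toList.map (fun c => String.ofList [c])
def pvIndVal (t : String) : List String := pvChars (PySem.Str.stripChars t "[]")
def pvBtnVal (t : String) : List Int := pvInts (PySem.Str.stripChars t "()")
def pvJolVal (t : String) : List Int := pvInts (PySem.Str.stripChars t "{}")

-- ===== PORT A =====
-- the body of A's for-loop: branch dispatch on the token's first character
def pvStepA (acc : Option (List String) × List (List Int) × Option (List Int)) (i : String) :
    Option (List String) × List (List Int) × Option (List Int) :=
  if pvIsInd i then (some (pvIndVal i), acc.2.1, acc.2.2)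
  else if pvIsBtn i then (acc.1, acc.2.1 ++ [pvBtnVal i], acc.2.2)
  else if pvIsJol i then (acc.1, acc.2.1, some (pvJolVal i))
  else acc

def read_instruction (instruction : String) : Option (List String) × List (List Int) × Option (List Int) :=
  (PySem.Str.split₀ instruction).foldl pvStepA (none, [], none)

-- ===== PORT B =====
-- B's `leaf`: summary of a single token
def pvLeaf (t : String) : Option (List String) × List (List Int) × Option (List Int) :=
  if pvIsInd t then (some (pvIndVal t), [], none)
  else if pvIsBtn t then (none, [pvBtnVal t], none)
  else if pvIsJol t then (none, [], some (pvJolVal t))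
  else (none, [], none)

-- B's `merge`: right summary wins for indicators/joltages, buttons concatenate
def pvMerge (x y : Option (List String) × List (List Int) × Option (List Int)) :
    Option (List String) × List (List Int) × Option (List Int) :=
  (y.1.or x.1, x.2.1 ++ y.2.1, (y.2.2).or x.2.2)

-- B's `summ`: divide and conquer over the token list (B indexes lo..hi into toks;
-- the same recursion expressed on the sublist itself)
def pvSumm : List String → Option (List String) × List (List Int) × Option (List Int)
  | [] => (none, [], none)
  | [t] => pvLeaf t
  | t1 :: t2 :: ts =>
      let l := t1 :: t2 :: ts
      let n := l.length / 2
      pvMerge (pvSumm (l.take n)) (pvSumm (l.drop n))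
termination_by l => l.length
decreasing_by
  · simp only [List.length_take, List.length_cons]; omega
  · simp only [List.length_drop, List.length_cons]; omega

def read_instruction_alt (instruction : String) : Option (List String) × List (List Int) × Option (List Int) :=
  pvSumm (PySem.Str.split₀ instruction)

-- ===== PRECONDITION & SPEC =====
-- Pre_ excludes exactly the inputs on which Python A raises ValueError: some '('- or
-- '{'-token whose stripped, comma-split pieces do not all parse as int (e.g. '(' or '{}').
def Pre_read_instruction (instruction : String) : Prop :=
  ∀ t ∈ PySem.Str.split₀ instruction,
    (pvIsBtn t = true → ∀ p ∈ PySem.Chars.splitOn (PySem.Str.stripChars t "()").toList ",".toList, (PySem.Int.ofChars? p).isSome = true) ∧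
    (pvIsJol t = true → ∀ p ∈ PySem.Chars.splitOn (PySem.Str.stripChars t "{}").toList ",".toList, (PySem.Int.ofChars? p).isSome = true)
instance (instruction : String) : Decidable (Pre_read_instruction instruction) := by unfold Pre_read_instruction; infer_instance

def pvWitness_read_instruction : String := "[abc] (1,2) {3,4}"

def Spec_read_instruction (instruction : String) (out : Option (List String) × List (List Int) × Option (List Int)) : Prop := out = read_instruction_alt instruction
instance (instruction : String) (out : Option (List String) × List (List Int) × Option (List Int)) : Decidable (Spec_read_instruction instruction out) := by unfold Spec_read_instruction; infer_instance

-- ===== CLAIM (what is proved, stated in full; the proofs are below) =====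
def Claim_equal_read_instruction : Prop := ∀ (instruction : String), Dom_read_instruction instruction → Pre_read_instruction instruction → Spec_read_instruction instruction (read_instruction instruction)

-- ===== LEMMAS AND PROOFS =====

def pvE : Option (List String) × List (List Int) × Option (List Int) := (none, [], none)

theorem pvMerge_e_right (x : Option (List String) × List (List Int) × Option (List Int)) :
    pvMerge x pvE = x := by
  simp [pvMerge, pvE, Option.or]

theorem pvMerge_assoc (x y z : Option (List String) × List (List Int) × Option (List Int)) :
    pvMerge (pvMerge x y) z = pvMerge x (pvMerge y z) := by
  simp only [pvMerge]
  refine Prod.ext ?_ (Prod.ext ?_ ?_) <;> simp [Option.or_assoc]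

-- one step of A's loop is: merge the accumulator with the leaf summary of the token
theorem pvStepA_eq_merge (acc : Option (List String) × List (List Int) × Option (List Int)) (t : String) :
    pvStepA acc t = pvMerge acc (pvLeaf t) := by
  simp only [pvStepA, pvLeaf, pvMerge]
  split_ifs <;> simp [Option.or]

-- A's fold from any accumulator = merge of the accumulator with the fold from the unit
theorem pv_foldl_merge (l : List String) (acc : Option (List String) × List (List Int) × Option (List Int)) :
    l.foldl pvStepA acc = pvMerge acc (l.foldl pvStepA pvE) := by
  induction l generalizing acc with
  | nil => simp [pvMerge_e_right]
  | cons t ts ih =>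
    simp only [List.foldl_cons]
    rw [ih (pvStepA acc t), ih (pvStepA pvE t), pvStepA_eq_merge acc t,
        pvStepA_eq_merge pvE t, pvMerge_assoc]
    have : pvMerge pvE (pvLeaf t) = pvLeaf t := by
      simp [pvMerge, pvE, Option.or_none]
    rw [this]

-- B's divide-and-conquer computes exactly A's fold from the unit
theorem pvSumm_eq_foldl (l : List String) : pvSumm l = l.foldl pvStepA pvE := by
  induction l using pvSumm.induct with
  | case1 => simp [pvSumm, pvE]
  | case2 t =>
    simp only [pvSumm, List.foldl_cons, List.foldl_nil]
    rw [pvStepA_eq_merge]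
    simp [pvMerge, pvE, Option.or_none]
  | case3 t1 t2 ts l n ih1 ih2 =>
    rw [pvSumm, ih1, ih2]
    rw [← pv_foldl_merge, ← List.foldl_append, List.take_append_drop]

-- ===== VERDICT (by name: the statement is the Claim_ definition above) =====
theorem read_instruction_spec : Claim_equal_read_instruction := by
  intro instruction _ _
  unfold Spec_read_instruction read_instruction read_instruction_alt
  rw [pvSumm_eq_foldl]
  rfl
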